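-- pv_equiv track=rewrite | github.com/JaredLGillespie/OpenKattis | Python/flowfree.py | find_color_positions
-- ===== SOURCE A (Python) =====
-- def find_color_positions(board):
--     colors = {}
--     squares_to_visit = 0
--
--     for row in range(4):
--         for col in range(4):
--             v = board[row][col]
--             if v == 'W':
--                 squares_to_visit += 1
--                 continue
--
--             if v not in colors:
--                 colors[v] = {}
--
--             if 'start' not in colors[v]:
--                 colors[v]['start'] = (row, col)
--             else:
--                 colors[v]['stop'] = (row, col)
--     return colors, squares_to_visit
-- ===== SOURCE B (Python) =====
-- def _endpoints(ps):
--     d = {'start': ps[0]}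
--     if len(ps) > 1:
--         d['stop'] = ps[-1]
--     return d
--
--
-- def find_color_positions(board):
--     # pass 1: group every non-'W' cell position by its color, count 'W' cells
--     groups = {}
--     squares_to_visit = 0
--     for row in range(4):
--         for col in range(4):
--             v = board[row][col]
--             if v == 'W':
--                 squares_to_visit += 1
--             else:
--                 groups[v] = groups.get(v, []) + [(row, col)]
--     # pass 2: reduce each position list to its endpoints
--     colors = {}
--     for v, ps in groups.items():
--         colors[v] = _endpoints(ps)
--     return colors, squares_to_visit
-- ===== Notes on version B (the rewrite author's own statement) =====
-- stated objective: alternative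
-- what changed: Replaces A's in-loop start/stop dict bookkeeping with a two-phase shape: one pass grouping each non-'W' cell position by color (plus the 'W' count), then a second pass reducing each color's position list to {'start': first, 'stop': last-if-more-than-one}.
import Mathlib
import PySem

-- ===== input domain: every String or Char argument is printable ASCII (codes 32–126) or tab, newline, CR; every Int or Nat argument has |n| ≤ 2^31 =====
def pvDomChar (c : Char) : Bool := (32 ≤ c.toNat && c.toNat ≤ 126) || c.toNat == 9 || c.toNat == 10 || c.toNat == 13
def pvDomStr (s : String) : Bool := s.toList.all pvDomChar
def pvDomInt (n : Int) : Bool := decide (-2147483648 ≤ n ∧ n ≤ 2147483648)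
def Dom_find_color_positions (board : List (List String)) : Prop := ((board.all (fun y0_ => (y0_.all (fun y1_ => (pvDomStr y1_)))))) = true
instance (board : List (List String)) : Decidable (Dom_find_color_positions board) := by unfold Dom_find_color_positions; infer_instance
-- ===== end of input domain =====

-- B groups positions per color in a first pass, then reduces each group to its endpoints in a
-- second pass, instead of A's in-loop start/stop bookkeeping (objective: alternative decomposition).

-- ===== PORT A =====
-- loop body of A's nested 4x4 scan; Python's in-place `colors[v]['start'] = …` is rendered as
-- re-inserting the updated inner dict (insert overwrites in place, so items order matches CPython)
def stepA (board : List (List String))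
    (st : PySem.Dict String (PySem.Dict String (Int × Int)) × Int) (row col : Int) :
    PySem.Dict String (PySem.Dict String (Int × Int)) × Int :=
  let v := PySem.List.pyGetD (PySem.List.pyGetD board row []) col ""   -- board[row][col]; in range under Pre_
  if v = "W" then (st.1, st.2 + 1)
  else
    let colors := if st.1.contains v then st.1 else st.1.insert v PySem.Dict.empty
    let inner := colors.getD v PySem.Dict.empty
    if inner.contains "start" = false then (colors.insert v (inner.insert "start" (row, col)), st.2)
    else (colors.insert v (inner.insert "stop" (row, col)), st.2)

def find_color_positions (board : List (List String)) : (List (String × List (String × Int × Int))) × Int :=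
  let st := (PySem.List.pyRange 0 4 1).foldl
    (fun st row => (PySem.List.pyRange 0 4 1).foldl (fun st col => stepA board st row col) st)
    ((PySem.Dict.empty : PySem.Dict String (PySem.Dict String (Int × Int))), (0 : Int))
  (st.1.items.map (fun q => (q.1, q.2.items)), st.2)

-- ===== PORT B =====
-- _endpoints(ps): {'start': ps[0]} plus 'stop': ps[-1] when len(ps) > 1
def endpointsOf (ps : List (Int × Int)) : PySem.Dict String (Int × Int) :=
  let d := (PySem.Dict.empty : PySem.Dict String (Int × Int)).insert "start" (PySem.List.pyGetD ps 0 (0, 0))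
  if 1 < ps.length then d.insert "stop" (PySem.List.pyGetD ps (-1) (0, 0)) else d

-- loop body of B's grouping pass: groups[v] = groups.get(v, []) + [(row, col)]
def stepB (board : List (List String))
    (st : PySem.Dict String (List (Int × Int)) × Int) (row col : Int) :
    PySem.Dict String (List (Int × Int)) × Int :=
  let v := PySem.List.pyGetD (PySem.List.pyGetD board row []) col ""
  if v = "W" then (st.1, st.2 + 1)
  else (st.1.insert v (st.1.getD v [] ++ [(row, col)]), st.2)

def find_color_positions_alt (board : List (List String)) : (List (String × List (String × Int × Int))) × Int :=
  let st := (PySem.List.pyRange 0 4 1).foldl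
    (fun st row => (PySem.List.pyRange 0 4 1).foldl (fun st col => stepB board st row col) st)
    ((PySem.Dict.empty : PySem.Dict String (List (Int × Int))), (0 : Int))
  let colors := st.1.items.foldl
    (fun c q => c.insert q.1 (endpointsOf q.2))
    (PySem.Dict.empty : PySem.Dict String (PySem.Dict String (Int × Int)))
  (colors.items.map (fun q => (q.1, q.2.items)), st.2)

-- ===== PRECONDITION & SPEC =====
-- Python A indexes board[row][col] for row, col in 0..3: it raises IndexError unless the board has
-- at least 4 rows and each of the first 4 rows has at least 4 entries; Pre_ is exactly that.
def Pre_find_color_positions (board : List (List String)) : Prop :=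
  4 ≤ board.length ∧ ∀ r ∈ board.take 4, 4 ≤ r.length
instance (board : List (List String)) : Decidable (Pre_find_color_positions board) := by
  unfold Pre_find_color_positions; infer_instance

def pvWitness_find_color_positions : List (List String) :=
  [["R", "W", "W", "R"], ["W", "B", "W", "W"], ["W", "B", "W", "G"], ["W", "W", "W", "W"]]

def Spec_find_color_positions (board : List (List String)) (out : (List (String × List (String × Int × Int))) × Int) : Prop := out = find_color_positions_alt board
instance (board : List (List String)) (out : (List (String × List (String × Int × Int))) × Int) : Decidable (Spec_find_color_positions board out) := by unfold Spec_find_color_positions; infer_instance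

-- ===== CLAIM (what is proved, stated in full; the proofs are below) =====
def Claim_equal_find_color_positions : Prop := ∀ (board : List (List String)), Dom_find_color_positions board → Pre_find_color_positions board → Spec_find_color_positions board (find_color_positions board)

-- ===== LEMMAS AND PROOFS =====

-- A's state, reconstructed from B's grouping: every color maps to the endpoints of its positions
def toA (G : PySem.Dict String (List (Int × Int))) : PySem.Dict String (PySem.Dict String (Int × Int)) :=
  PySem.Dict.mk (G.items.map (fun q => (q.1, endpointsOf q.2)))

-- the coupling invariant of the 4x4 scan
def PVRel (a : PySem.Dict String (PySem.Dict String (Int × Int)) × Int)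
    (b : PySem.Dict String (List (Int × Int)) × Int) : Prop :=
  a.1 = toA b.1 ∧ a.2 = b.2 ∧ (∀ q ∈ b.1.items, q.2 ≠ []) ∧ b.1.keys.Nodup

lemma dict_ext {κ ν : Type} (d d' : PySem.Dict κ ν) (h : d.items = d'.items) : d = d' := by
  cases d; cases d'; cases h; rfl

lemma contains_toA (G : PySem.Dict String (List (Int × Int))) (v : String) :
    (toA G).contains v = G.contains v := by
  rw [show G.contains v = (PySem.Dict.mk G.items).contains v from rfl]
  rw [toA, PySem.Dict.contains_mk, PySem.Dict.contains_mk, List.any_map]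
  rfl

lemma get?_toA (G : PySem.Dict String (List (Int × Int))) (v : String) :
    (toA G).get? v = (G.get? v).map endpointsOf := by
  rw [show G.get? v = (PySem.Dict.mk G.items).get? v from rfl, toA]
  induction G.items with
  | nil => rfl
  | cons q t ih =>
    rw [List.map_cons, PySem.Dict.get?_mk_cons, PySem.Dict.get?_mk_cons]
    by_cases h : q.1 == v
    · simp [h]
    · simp only [h, Bool.false_eq_true, ite_false]; exact ih

lemma pyGetD_zero_cons (a d : Int × Int) (t : List (Int × Int)) :
    PySem.List.pyGetD (a :: t) 0 d = a := by
  simp [PySem.List.pyGetD, PySem.List.pyGet?, PySem.List.pyIdx?]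

lemma pyGetD_neg_one_concat (p d : Int × Int) (l : List (Int × Int)) :
    PySem.List.pyGetD (l ++ [p]) (-1) d = p := by
  simp [PySem.List.pyGetD, PySem.List.pyGet?, PySem.List.pyIdx?]

lemma endpoints_singleton (p : Int × Int) :
    endpointsOf [p] = (PySem.Dict.empty : PySem.Dict String (Int × Int)).insert "start" p := by
  simp [endpointsOf]

lemma endpoints_contains_start (ps : List (Int × Int)) :
    (endpointsOf ps).contains "start" = true := by
  unfold endpointsOf
  split <;> simp [PySem.Dict.contains_insert]

lemma endpoints_append (ps : List (Int × Int)) (p : Int × Int) (h : ps ≠ []) :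
    (endpointsOf ps).insert "stop" p = endpointsOf (ps ++ [p]) := by
  obtain ⟨a, t, rfl⟩ := List.exists_cons_of_ne_nil h
  unfold endpointsOf
  rw [show ((a :: t) ++ [p]) = a :: (t ++ [p]) from rfl, pyGetD_zero_cons, pyGetD_zero_cons,
    show (a :: (t ++ [p])) = (a :: t) ++ [p] from rfl, pyGetD_neg_one_concat]
  by_cases hl : 1 < (a :: t).length
  · rw [if_pos hl, if_pos (by simp only [List.length_append, List.length_cons]; omega)]
    simp [PySem.Dict.insert, PySem.Dict.contains_mk, PySem.Dict.empty]
  · rw [if_neg hl, if_pos (by simp only [List.length_append, List.length_cons]; omega)]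

lemma not_contains_keys (G : PySem.Dict String (List (Int × Int))) (v : String)
    (hc : G.contains v = false) : ∀ q ∈ G.items, (q.1 == v) = false := by
  intro q hq
  have := PySem.Dict.contains_mk G.items v
  rw [show (PySem.Dict.mk G.items) = G from dict_ext _ _ rfl] at this
  rw [hc] at this
  exact Bool.eq_false_iff.mpr ((List.any_eq_false.mp this.symm) q hq)

lemma insert_toA_contains (G : PySem.Dict String (List (Int × Int))) (v : String)
    (L : List (Int × Int)) (hc : G.contains v = true) :
    (toA G).insert v (endpointsOf L) = toA (G.insert v L) := by
  apply dict_ext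
  rw [PySem.Dict.items_insert_of_contains _ _ (by rw [contains_toA]; exact hc)]
  rw [toA, toA, PySem.Dict.items_insert_of_contains _ _ hc]
  simp only [List.map_map]
  apply List.map_congr_left
  intro q _
  by_cases hq : q.1 = v <;> simp [hq]

lemma insert_toA_not_contains (G : PySem.Dict String (List (Int × Int))) (v : String)
    (p : Int × Int) (hc : G.contains v = false) :
    ((toA G).insert v PySem.Dict.empty).insert v (PySem.Dict.empty.insert "start" p)
      = toA (G.insert v [p]) := by
  apply dict_ext
  have hA : (toA G).contains v = false := by rw [contains_toA]; exact hc
  rw [PySem.Dict.items_insert_of_contains _ _ (PySem.Dict.contains_insert_self _ _ _),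
    PySem.Dict.items_insert_of_not_contains _ _ hA,
    toA, toA, PySem.Dict.items_insert_of_not_contains _ _ hc]
  rw [List.map_append, List.map_append]
  congr 1
  · rw [show ∀ (l : List (String × PySem.Dict String (Int × Int))), (PySem.Dict.mk l).items = l from fun _ => rfl]
    conv_rhs => rw [← List.map_id (List.map (fun q => (q.1, endpointsOf q.2)) G.items)]
    apply List.map_congr_left
    intro q hq
    rw [List.mem_map] at hq
    obtain ⟨q0, hq0, rfl⟩ := hq
    simp [not_contains_keys G v hc q0 hq0]
  · simp [endpoints_singleton]

lemma step_rel (board : List (List String))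
    (a : PySem.Dict String (PySem.Dict String (Int × Int)) × Int)
    (b : PySem.Dict String (List (Int × Int)) × Int) (row col : Int) (h : PVRel a b) :
    PVRel (stepA board a row col) (stepB board b row col) := by
  obtain ⟨a1, a2⟩ := a
  obtain ⟨b1, b2⟩ := b
  obtain ⟨h1, h2, h3, h4⟩ := h
  simp only at h1 h2
  subst h1 h2
  unfold stepA stepB
  set v := PySem.List.pyGetD (PySem.List.pyGetD board row []) col "" with hv
  by_cases hw : v = "W"
  · simp only [hw, ite_true]

    exact ⟨rfl, rfl, h3, h4⟩
  · simp only [if_neg hw]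
    by_cases hc : b1.contains v
    · -- existing color: A overwrites 'stop', B appends the position
      rw [contains_toA, if_pos hc]
      obtain ⟨ps, hps⟩ : ∃ ps, b1.get? v = some ps := by
        have := PySem.Dict.contains_eq_isSome_get? b1 v
        rw [hc] at this
        exact Option.isSome_iff_exists.mp this.symm
      have hmem : (v, ps) ∈ b1.items := PySem.Dict.mem_items_of_get?_eq_some b1 hps
      have hne : ps ≠ [] := h3 _ hmem
      have hgetD : (toA b1).getD v PySem.Dict.empty = endpointsOf ps := by
        rw [PySem.Dict.getD_eq_get?_getD, get?_toA, hps]; rfl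
      have hgetDb : b1.getD v [] = ps := by
        rw [PySem.Dict.getD_eq_get?_getD, hps]; rfl
      rw [hgetD, hgetDb, endpoints_contains_start]
      rw [if_neg (by simp)]
      refine ⟨?_, rfl, ?_, ?_⟩
      · simp only
        rw [endpoints_append ps _ hne, insert_toA_contains _ _ _ hc]
      · intro q hq
        rw [PySem.Dict.items_insert_of_contains _ _ hc, List.mem_map] at hq
        obtain ⟨q0, hq0, rfl⟩ := hq
        by_cases hqv : (q0.1 == v) = true <;> simp [hqv]
        · exact h3 _ hq0
      · rw [PySem.Dict.keys_insert_of_contains _ _ hc]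
        exact h4
    · -- new color: both create the entry
      rw [contains_toA, if_neg hc]
      have hc' : b1.contains v = false := Bool.eq_false_iff.mpr hc
      have hgetD : ((toA b1).insert v PySem.Dict.empty).getD v PySem.Dict.empty = PySem.Dict.empty := by
        rw [PySem.Dict.getD_eq_get?_getD, PySem.Dict.get?_insert_self]; rfl
      have hgetDb : b1.getD v [] = [] := PySem.Dict.getD_of_not_contains _ _ hc'
      rw [hgetD, hgetDb, PySem.Dict.contains_empty]
      simp only [List.nil_append]
      refine ⟨insert_toA_not_contains _ _ _ hc', rfl, ?_, ?_⟩
      · intro q hq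
        rw [PySem.Dict.items_insert_of_not_contains _ _ hc', List.mem_append] at hq
        rcases hq with hq | hq
        · exact h3 _ hq
        · simp at hq; subst hq; simp
      · rw [PySem.Dict.keys_insert_of_not_contains _ _ hc']
        refine List.Nodup.append h4 (List.nodup_singleton v) ?_
        intro x hx hxm
        rw [List.mem_singleton] at hxm; subst hxm
        have := PySem.Dict.contains_eq_decide_mem_keys b1 v
        rw [hc'] at this
        exact (of_decide_eq_false this.symm) hx

lemma foldl_rel {α : Type} (f : PySem.Dict String (PySem.Dict String (Int × Int)) × Int → α → PySem.Dict String (PySem.Dict String (Int × Int)) × Int)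
    (g : PySem.Dict String (List (Int × Int)) × Int → α → PySem.Dict String (List (Int × Int)) × Int)
    (hfg : ∀ a b x, PVRel a b → PVRel (f a x) (g b x)) :
    ∀ (L : List α) a b, PVRel a b → PVRel (L.foldl f a) (L.foldl g b) := by
  intro L
  induction L with
  | nil => intro a b h; exact h
  | cons x t ih => intro a b h; exact ih _ _ (hfg a b x h)

lemma foldl_insert_fresh (L : List (String × List (Int × Int)))
    (c : PySem.Dict String (PySem.Dict String (Int × Int)))
    (hc : ∀ q ∈ L, c.contains q.1 = false) (hL : (L.map Prod.fst).Nodup) :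
    (L.foldl (fun c q => c.insert q.1 (endpointsOf q.2)) c).items
      = c.items ++ L.map (fun q => (q.1, endpointsOf q.2)) := by
  induction L generalizing c with
  | nil => simp
  | cons a t ih =>
    rw [List.foldl_cons, List.map_cons]
    rw [List.map_cons, List.nodup_cons] at hL
    rw [ih _ ?_ hL.2, PySem.Dict.items_insert_of_not_contains _ _ (hc a (List.mem_cons_self))]
    · simp
    · intro q hq
      rw [PySem.Dict.contains_insert]
      have h1 : (q.1 == a.1) = false := by
        rw [beq_eq_false_iff_ne]
        intro he
        exact hL.1 (he ▸ List.mem_map_of_mem hq)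
      rw [h1, hc q (List.mem_cons_of_mem _ hq)]
      rfl

-- ===== VERDICT (by name: the statement is the Claim_ definition above) =====
theorem find_color_positions_spec : Claim_equal_find_color_positions := by
  intro board _ _
  unfold Spec_find_color_positions find_color_positions find_color_positions_alt
  have hinit : PVRel ((PySem.Dict.empty : PySem.Dict String (PySem.Dict String (Int × Int))), (0 : Int))
      ((PySem.Dict.empty : PySem.Dict String (List (Int × Int))), (0 : Int)) := by
    refine ⟨rfl, rfl, ?_, ?_⟩
    · intro q hq; cases hq
    · exact List.nodup_nil
  have hrel := foldl_rel
    (fun st row => (PySem.List.pyRange 0 4 1).foldl (fun st col => stepA board st row col) st)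
    (fun st row => (PySem.List.pyRange 0 4 1).foldl (fun st col => stepB board st row col) st)
    (fun a b x h => foldl_rel (fun st col => stepA board st x col)
      (fun st col => stepB board st x col)
      (fun a b y h => step_rel board a b x y h) (PySem.List.pyRange 0 4 1) a b h)
    (PySem.List.pyRange 0 4 1) _ _ hinit
  obtain ⟨h1, h2, h3, h4⟩ := hrel
  set stB := (PySem.List.pyRange 0 4 1).foldl
    (fun st row => (PySem.List.pyRange 0 4 1).foldl (fun st col => stepB board st row col) st)
    ((PySem.Dict.empty : PySem.Dict String (List (Int × Int))), (0 : Int)) with hstB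
  have hkeys : (stB.1.items.map Prod.fst).Nodup := by
    have := PySem.Dict.keys_mk stB.1.items
    rw [show (PySem.Dict.mk stB.1.items) = stB.1 from dict_ext _ _ rfl] at this
    rw [← this]; exact h4
  have hcol := foldl_insert_fresh stB.1.items PySem.Dict.empty
    (fun q _ => PySem.Dict.contains_empty q.1) hkeys
  simp only [h1, h2, hcol]
  rfl
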